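-- pv_equiv track=rewrite | github.com/JKaraman93/airport_weather_evaluation | helpers.py | get_prev_time
-- ===== SOURCE A (Python) =====
-- def get_prev_time(speci, time_dict):
--     timestamps = sorted(time_dict)  # Sort the timestamps
--     previous_timestamp = timestamps[0]
--
--     for ts in timestamps:
--         if ts < speci:
--             previous_timestamp = ts
--         else:
--             break
--     return previous_timestamp
-- ===== SOURCE B (Python) =====
-- def get_prev_time(speci, time_dict):
--     lows = [ts for ts in time_dict if ts < speci]
--     return max(lows) if lows else min(time_dict)
-- ===== Notes on version B (the rewrite author's own statement) =====
-- stated objective: simpler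
-- what changed: Replaces the sort-then-ordered-scan-with-break by a single filtering pass: take the max of the timestamps strictly below speci, falling back to the overall min when none exist; no sort at all.
import Mathlib
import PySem

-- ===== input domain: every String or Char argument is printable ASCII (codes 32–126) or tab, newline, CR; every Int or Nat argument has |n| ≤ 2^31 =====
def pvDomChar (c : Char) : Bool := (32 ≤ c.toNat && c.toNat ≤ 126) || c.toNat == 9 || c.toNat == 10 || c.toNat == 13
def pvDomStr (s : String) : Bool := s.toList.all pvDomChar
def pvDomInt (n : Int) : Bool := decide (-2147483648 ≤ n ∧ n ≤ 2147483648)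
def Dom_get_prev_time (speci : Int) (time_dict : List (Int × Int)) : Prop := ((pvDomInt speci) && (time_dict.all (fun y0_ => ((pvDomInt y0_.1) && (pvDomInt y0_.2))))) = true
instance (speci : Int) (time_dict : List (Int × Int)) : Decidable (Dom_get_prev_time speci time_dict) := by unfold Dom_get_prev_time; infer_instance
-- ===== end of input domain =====

-- B replaces A's sort-then-scan-with-break by one filtering pass (max of the keys below
-- speci, else the overall min); objective: simpler, no sort.

-- ===== PORT A =====
-- the 'for ts in timestamps: if ts < speci: previous_timestamp = ts else: break' loop
def gptLoop (speci : Int) (prev : Int) : List Int → Int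
  | [] => prev
  | ts :: rest => if ts < speci then gptLoop speci ts rest else prev

def get_prev_time (speci : Int) (time_dict : List (Int × Int)) : Int :=
  -- iterating a dict yields its (distinct) keys in insertion order; sorted(time_dict)
  let timestamps := PySem.List.sorted (PySem.List.dedup (time_dict.map (·.1))) (fun x => x) false
  match PySem.List.pyGet? timestamps 0 with   -- timestamps[0]; none = IndexError, outside Pre_
  | none => 0
  | some t0 => gptLoop speci t0 timestamps

-- ===== PORT B =====
def get_prev_time_alt (speci : Int) (time_dict : List (Int × Int)) : Int :=
  let keys := PySem.List.dedup (time_dict.map (·.1))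
  let lows := keys.filter (fun ts => decide (ts < speci))
  if lows.isEmpty then (PySem.List.min? keys (fun x => x)).getD 0
  else (PySem.List.max? lows (fun x => x)).getD 0

-- ===== PRECONDITION & SPEC =====
-- Pre_ excludes only the empty dict, where A raises IndexError (B raises ValueError there).
def Pre_get_prev_time (speci : Int) (time_dict : List (Int × Int)) : Prop := time_dict ≠ []
instance (speci : Int) (time_dict : List (Int × Int)) : Decidable (Pre_get_prev_time speci time_dict) := by unfold Pre_get_prev_time; infer_instance
def pvWitness_get_prev_time : Int × (List (Int × Int)) := (5, [(3, 1), (7, 2)])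

def Spec_get_prev_time (speci : Int) (time_dict : List (Int × Int)) (out : Int) : Prop := out = get_prev_time_alt speci time_dict
instance (speci : Int) (time_dict : List (Int × Int)) (out : Int) : Decidable (Spec_get_prev_time speci time_dict out) := by unfold Spec_get_prev_time; infer_instance

-- ===== CLAIM (what is proved, stated in full; the proofs are below) =====
def Claim_equal_get_prev_time : Prop := ∀ (speci : Int) (time_dict : List (Int × Int)), Dom_get_prev_time speci time_dict → Pre_get_prev_time speci time_dict → Spec_get_prev_time speci time_dict (get_prev_time speci time_dict)

-- ===== LEMMAS AND PROOFS =====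

-- 'last element, default d' as A's loop accumulates it
def lastD (d : Int) : List Int → Int
  | [] => d
  | x :: t => lastD x t

theorem lastD_mem (d : Int) (l : List Int) (h : l ≠ []) : lastD d l ∈ l := by
  induction l generalizing d with
  | nil => exact absurd rfl h
  | cons x t ih =>
    cases t with
    | nil => simp [lastD]
    | cons y u => simpa [lastD] using Or.inr (ih x (by simp))

theorem lastD_ge (d : Int) (l : List Int) (hp : l.Pairwise (· ≤ ·)) :
    ∀ y ∈ l, y ≤ lastD d l := by
  induction l generalizing d with
  | nil => intro y hy; cases hy
  | cons x t ih =>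
    intro y hy
    rcases List.mem_cons.mp hy with rfl | hyt
    · cases t with
      | nil => simp [lastD]
      | cons z u =>
        have hmem := lastD_mem y (z :: u) (by simp)
        exact (List.pairwise_cons.mp hp).1 _ (by simpa [lastD] using hmem)
    · exact ih x (List.pairwise_cons.mp hp).2 y hyt

-- A's break-loop on a sorted list is 'last element of the <speci prefix, default prev'
theorem gptLoop_eq_lastD (speci prev : Int) (l : List Int) (hp : l.Pairwise (· ≤ ·)) :
    gptLoop speci prev l = lastD prev (l.filter (fun x => decide (x < speci))) := by
  induction l generalizing prev with
  | nil => rfl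
  | cons ts rest ih =>
    obtain ⟨hle, hp'⟩ := List.pairwise_cons.mp hp
    by_cases h : ts < speci
    · simp only [gptLoop, if_pos h, List.filter_cons, decide_eq_true h]
      exact ih ts hp'
    · have hfil : rest.filter (fun x => decide (x < speci)) = [] := by
        apply List.filter_eq_nil_iff.mpr
        intro x hx
        simp only [decide_eq_true_eq]
        exact fun hlt => h (lt_of_le_of_lt (hle x hx) hlt)
      simp [gptLoop, h, hfil, lastD]

theorem get_prev_time_spec : Claim_equal_get_prev_time := by
  intro speci time_dict _ hpre
  unfold Spec_get_prev_time get_prev_time get_prev_time_alt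
  dsimp only
  set keys := PySem.List.dedup (time_dict.map (·.1)) with hkeys
  have hkne : keys ≠ [] := by
    intro h
    have : time_dict.map (·.1) = [] := by
      cases hm : time_dict.map (·.1) with
      | nil => rfl
      | cons a t =>
        have : a ∈ keys := by
          rw [hkeys, hm]; exact (PySem.List.mem_dedup _ _).mpr (by simp)
        simp [h] at this
    exact hpre (List.map_eq_nil_iff.mp this)
  set s := PySem.List.sorted keys (fun x => x) false with hs
  have hperm : s.Perm keys := PySem.List.sorted_perm ..
  have hsne : s ≠ [] := by
    intro h; exact hkne (List.Perm.eq_nil ((h ▸ hperm.symm : keys.Perm [])))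
  have hsp : s.Pairwise (· ≤ ·) := PySem.List.sorted_pairwise ..
  obtain ⟨t0, tl, hcons⟩ := List.exists_cons_of_ne_nil hsne
  have hget : PySem.List.pyGet? s 0 = some t0 := by
    simp [hcons, PySem.List.pyGet?, PySem.List.pyIdx?]
  rw [hget]
  show gptLoop speci t0 s = _
  rw [gptLoop_eq_lastD speci t0 s hsp]
  set fs := s.filter (fun x => decide (x < speci)) with hfs
  set fk := keys.filter (fun x => decide (x < speci)) with hfk
  have hfperm : fs.Perm fk := hperm.filter _
  by_cases hempty : fk = []
  · -- no key below speci: A returns s[0], B returns min keys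
    have hfse : fs = [] := List.Perm.eq_nil (hempty ▸ hfperm)
    rw [if_pos (by simp [hempty])]
    cases hm : PySem.List.min? keys (fun x => x) with
    | none => exact absurd ((PySem.List.min?_eq_none_iff _ _).mp hm) hkne
    | some m =>
    rw [Option.getD_some]
    have hmmem : m ∈ keys := PySem.List.min?_mem hm
    have hmin : ∀ y ∈ keys, m ≤ y := fun y hy => PySem.List.min?_isMin hm y hy
    have ht0min : ∀ y ∈ keys, t0 ≤ y := PySem.List.key_head_sorted_le keys (fun x => x) hcons
    have h1 : m ≤ t0 := hmin t0 (hperm.mem_iff.mp (by simp [hcons]))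
    have h2 : t0 ≤ m := ht0min m hmmem
    simp [hfse, lastD, le_antisymm h1 h2]
  · -- some key below speci: A returns last of sorted filter, B returns max of filter
    have hfsne : fs ≠ [] := fun h => hempty (List.Perm.eq_nil (h ▸ hfperm.symm))
    rw [if_neg (by simp [hempty])]
    cases hm : PySem.List.max? fk (fun x => x) with
    | none => exact absurd ((PySem.List.max?_eq_none_iff _ _).mp hm) hempty
    | some m =>
    rw [Option.getD_some]
    have hmmem : m ∈ fk := PySem.List.max?_mem hm
    have hmax : ∀ y ∈ fk, y ≤ m := fun y hy => PySem.List.max?_isMax hm y hy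
    have hfsp : fs.Pairwise (· ≤ ·) := hsp.filter _
    have hlmem : lastD t0 fs ∈ fs := lastD_mem t0 fs hfsne
    have h1 : lastD t0 fs ≤ m := hmax _ (hfperm.mem_iff.mp hlmem)
    have h2 : m ≤ lastD t0 fs := lastD_ge t0 fs hfsp m (hfperm.mem_iff.mpr hmmem)
    exact le_antisymm h1 h2
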